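-- pv_equiv track=rewrite | github.com/Minhdt-ptit25/Training-Iu-Club | hiệu luân phiên.py | hieu_luan_phien
-- ===== SOURCE A (Python) =====
-- def reverse(n):
--     rev = 0
--     while n > 0:
--         rev = rev * 10 + n % 10
--         n //= 10
--     return rev
--
-- def hieu_luan_phien(n):
--     n = reverse(n)
--     ru = -1
--     sum = 0
--     while n > 0:
--         char = 0
--         char += n % 10
--         sum += char * ru
--         ru *= -1
--         n //= 10
--     return sum
-- ===== SOURCE B (Python) =====
-- def hieu_luan_phien(n):
--     if n <= 0:
--         return 0
--     total = 0
--     sign = -1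
--     for ch in str(n):
--         total += sign * int(ch)
--         sign = -sign
--     return total
-- ===== Notes on version B (the rewrite author's own statement) =====
-- stated objective: simpler
-- what changed: B drops A's numeric reverse helper and its second digit loop, instead making one MSD-first pass over str(n) with a flipping sign; the trailing digits A's reversal silently drops contribute nothing either way.
import Mathlib
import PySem

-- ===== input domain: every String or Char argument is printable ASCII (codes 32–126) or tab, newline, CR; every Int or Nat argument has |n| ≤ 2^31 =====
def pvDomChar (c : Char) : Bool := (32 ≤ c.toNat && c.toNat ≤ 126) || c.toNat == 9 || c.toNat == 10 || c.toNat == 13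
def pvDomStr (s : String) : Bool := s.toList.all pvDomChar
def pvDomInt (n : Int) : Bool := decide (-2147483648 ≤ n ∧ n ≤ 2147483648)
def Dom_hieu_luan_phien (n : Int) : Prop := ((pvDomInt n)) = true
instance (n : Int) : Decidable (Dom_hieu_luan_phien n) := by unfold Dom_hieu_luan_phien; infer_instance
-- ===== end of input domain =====

-- B replaces A's numeric reverse helper + second digit loop by one MSD-first scan over str(n)
-- with a flipping sign (objective: simpler). Same return value on every int.

-- ===== PORT A =====
-- while n > 0: rev = rev*10 + n%10; n //= 10   (fuel n.toNat only makes the loop total: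
-- n.toNat strictly drops each iteration, so the fuel is never exhausted while 0 < n)
def pvRevLoopAux : Nat → Int → Int → Int
  | 0, _, rev => rev
  | f + 1, n, rev =>
    if 0 < n then
      pvRevLoopAux f (PySem.Int.floordiv n 10) (rev * 10 + PySem.Int.mod n 10)
    else rev

def pvRevLoop (n rev : Int) : Int := pvRevLoopAux n.toNat n rev

-- while n > 0: char = 0; char += n % 10; sum += char * ru; ru *= -1; n //= 10   (same fuel guard)
def pvSumLoopAux : Nat → Int → Int → Int → Int
  | 0, _, _, s => s
  | f + 1, n, ru, s =>
    if 0 < n then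
      pvSumLoopAux f (PySem.Int.floordiv n 10) (ru * (-1)) (s + (0 + PySem.Int.mod n 10) * ru)
    else s

def pvSumLoop (n ru s : Int) : Int := pvSumLoopAux n.toNat n ru s

def hieu_luan_phien (n : Int) : Int :=
  pvSumLoop (pvRevLoop n 0) (-1) 0

-- ===== PORT B =====
-- state (sign, total); int(ch) is ported as ch.toNat - 48, exact on the decimal digits str(n) yields for n > 0
def hieu_luan_phien_alt (n : Int) : Int :=
  if n ≤ 0 then 0
  else
    ((PySem.Int.toStr n).toList.foldl
      (fun (p : Int × Int) (c : Char) => (-p.1, p.2 + p.1 * ((c.toNat : Int) - 48)))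
      (-1, 0)).2

-- ===== PRECONDITION & SPEC =====
def Spec_hieu_luan_phien (n : Int) (out : Int) : Prop := out = hieu_luan_phien_alt n
instance (n : Int) (out : Int) : Decidable (Spec_hieu_luan_phien n out) := by unfold Spec_hieu_luan_phien; infer_instance

-- ===== CLAIM (what is proved, stated in full; the proofs are below) =====
def Claim_equal_hieu_luan_phien : Prop := ∀ (n : Int), Dom_hieu_luan_phien n → Spec_hieu_luan_phien n (hieu_luan_phien n)

-- ===== LEMMAS AND PROOFS =====

-- alternating digit sum over an LSD-first digit list, starting with sign ru
def pvAlt : List Nat → Int → Int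
  | [], _ => 0
  | d :: t, ru => (d : Int) * ru + pvAlt t (-ru)

-- Nat mirror of A's reverse loop
def pvRevNat (m r : Nat) : Nat :=
  if h : 0 < m then pvRevNat (m / 10) (r * 10 + m % 10) else r
termination_by m
decreasing_by omega

lemma pvRevLoopAux_natCast (f : Nat) : ∀ m r : Nat, m ≤ f →
    pvRevLoopAux f (m : Int) (r : Int) = (pvRevNat m r : Int) := by
  induction f with
  | zero =>
    intro m r hmf
    have hm0 : m = 0 := by omega
    rw [hm0, pvRevLoopAux, pvRevNat]
    simp
  | succ f ih =>
    intro m r hmf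
    rw [pvRevLoopAux, pvRevNat]
    by_cases hm : 0 < m
    · have hc : (0 : Int) < (m : Int) := by exact_mod_cast hm
      have hf : PySem.Int.floordiv (m : Int) 10 = ((m / 10 : Nat) : Int) := by
        exact_mod_cast PySem.Int.floordiv_natCast m 10
      have hmd : PySem.Int.mod (m : Int) 10 = ((m % 10 : Nat) : Int) := by
        exact_mod_cast PySem.Int.mod_natCast m 10
      rw [if_pos hc, dif_pos hm, hf, hmd]
      have hcast : (r : Int) * 10 + ((m % 10 : Nat) : Int) = ((r * 10 + m % 10 : Nat) : Int) := by
        omega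
      rw [hcast]
      exact ih (m / 10) _ (by omega)
    · have hc : ¬ (0 : Int) < (m : Int) := by exact_mod_cast hm
      rw [if_neg hc, dif_neg hm]

lemma pvSumLoopAux_natCast (f : Nat) : ∀ m : Nat, m ≤ f → ∀ ru s : Int,
    pvSumLoopAux f (m : Int) ru s = s + pvAlt (Nat.digits 10 m) ru := by
  induction f with
  | zero =>
    intro m hmf ru s
    have hm0 : m = 0 := by omega
    rw [hm0, pvSumLoopAux]
    simp [pvAlt]
  | succ f ih =>
    intro m hmf ru s
    rw [pvSumLoopAux]
    by_cases hm : 0 < m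
    · have hc : (0 : Int) < (m : Int) := by exact_mod_cast hm
      have hf : PySem.Int.floordiv (m : Int) 10 = ((m / 10 : Nat) : Int) := by
        exact_mod_cast PySem.Int.floordiv_natCast m 10
      have hmd : PySem.Int.mod (m : Int) 10 = ((m % 10 : Nat) : Int) := by
        exact_mod_cast PySem.Int.mod_natCast m 10
      rw [if_pos hc, hf, hmd,
        ih (m / 10) (by omega), Nat.digits_def' (by norm_num : 1 < 10) hm, pvAlt,
        mul_neg_one]
      ring
    · have hc : ¬ (0 : Int) < (m : Int) := by exact_mod_cast hm
      have hm0 : m = 0 := by omega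
      rw [if_neg hc, hm0]
      simp [pvAlt]

lemma pvAlt_append_singleton (l : List Nat) (d : Nat) : ∀ ru : Int,
    pvAlt (l ++ [d]) ru = pvAlt l ru + ru * (-1) ^ l.length * (d : Int) := by
  induction l with
  | nil => intro ru; simp [pvAlt]; ring
  | cons x t ih =>
    intro ru
    simp only [List.cons_append, pvAlt, ih (-ru), List.length_cons]
    ring

-- digits of the reversed number, when the accumulator is already positive
lemma digits_pvRevNat (m : Nat) : ∀ r : Nat, 0 < r →
    Nat.digits 10 (pvRevNat m r) = (Nat.digits 10 m).reverse ++ Nat.digits 10 r := by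
  induction m using Nat.strong_induction_on with
  | _ m ih =>
    intro r hr
    rw [pvRevNat]
    by_cases hm : 0 < m
    · rw [dif_pos hm, ih (m / 10) (by omega) _ (by omega),
        Nat.digits_def' (by norm_num : 1 < 10) hm]
      have h1 : Nat.digits 10 (r * 10 + m % 10) = m % 10 :: Nat.digits 10 r := by
        rw [Nat.digits_def' (by norm_num : 1 < 10) (by omega)]
        have e1 : (r * 10 + m % 10) % 10 = m % 10 := by omega
        have e2 : (r * 10 + m % 10) / 10 = r := by omega
        rw [e1, e2]
      rw [h1]
      simp
    · rw [dif_neg hm]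
      have hm0 : m = 0 := by omega
      simp [hm0]

-- A's total equals the alternating sum over the reversed digit list of n
lemma pvAlt_digits_rev (m : Nat) :
    pvAlt (Nat.digits 10 (pvRevNat m 0)) (-1) = pvAlt (Nat.digits 10 m).reverse (-1) := by
  induction m using Nat.strong_induction_on with
  | _ m ih =>
    rw [pvRevNat]
    by_cases hm : 0 < m
    · rw [dif_pos hm]
      by_cases hd : 0 < m % 10
      · rw [digits_pvRevNat (m / 10) _ (by omega),
          Nat.digits_def' (by norm_num : 1 < 10) hm]
        have h1 : Nat.digits 10 (0 * 10 + m % 10) = [m % 10] := by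
          rw [Nat.digits_def' (by norm_num : 1 < 10) (by omega)]
          have e1 : (0 * 10 + m % 10) % 10 = m % 10 := by omega
          have e2 : (0 * 10 + m % 10) / 10 = 0 := by omega
          rw [e1, e2]; simp
        rw [h1]
        simp
      · have hd0 : m % 10 = 0 := by omega
        rw [hd0]
        have : (0 : Nat) * 10 + 0 = 0 := by omega
        rw [this, ih (m / 10) (by omega),
          Nat.digits_def' (by norm_num : 1 < 10) hm, hd0]
        simp only [List.reverse_cons, pvAlt_append_singleton]
        simp
    · rw [dif_neg hm]
      have hm0 : m = 0 := by omega
      simp [hm0]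

-- unfolding of Nat.toDigits via Nat.digits
lemma toDigitsCore_eq (f : Nat) : ∀ m l, 0 < m → m < f →
    Nat.toDigitsCore 10 f m l = ((Nat.digits 10 m).map Nat.digitChar).reverse ++ l := by
  induction f with
  | zero => intro m l hm hf; omega
  | succ f ih =>
    intro m l hm hf
    rw [Nat.toDigitsCore]
    by_cases h0 : m / 10 = 0
    · simp only [h0, if_true]
      rw [Nat.digits_def' (by norm_num : 1 < 10) hm, h0]
      simp
    · simp only [h0, if_false]
      rw [ih (m / 10) _ (by omega) (by omega),
        Nat.digits_def' (by norm_num : 1 < 10) hm]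
      simp

lemma digitChar_val (d : Nat) (hd : d < 10) : ((Nat.digitChar d).toNat : Int) - 48 = (d : Int) := by
  interval_cases d <;> rfl

-- B's foldl over the MSD-first char list, moved to a foldr over the LSD-first digit list
def pvG (d : Nat) (p : Int × Int) : Int × Int := (-p.1, p.2 + p.1 * (d : Int))

lemma foldr_digitChar (l : List Nat) (hl : ∀ d ∈ l, d < 10) (init : Int × Int) :
    l.foldr (fun d p => (-p.1, p.2 + p.1 * (((Nat.digitChar d).toNat : Int) - 48))) init
      = l.foldr pvG init := by
  induction l with
  | nil => rfl
  | cons x t ih =>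
    simp only [List.foldr_cons, ih (fun d hd => hl d (List.mem_cons_of_mem _ hd))]
    rw [pvG, digitChar_val x (hl x (List.mem_cons_self))]

lemma foldr_pvG (l : List Nat) : ∀ ru : Int,
    l.foldr pvG (ru, 0) = (ru * (-1) ^ l.length, pvAlt l.reverse ru) := by
  induction l with
  | nil => intro ru; simp [pvAlt]
  | cons x t ih =>
    intro ru
    simp only [List.foldr_cons, ih ru, pvG, List.reverse_cons, pvAlt_append_singleton,
      List.length_reverse, List.length_cons]
    rw [Prod.mk.injEq]
    exact ⟨by ring, rfl⟩

lemma alt_eq_foldr (m : Nat) (hm : 0 < m) :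
    hieu_luan_phien_alt (m : Int) = pvAlt (Nat.digits 10 m).reverse (-1) := by
  have hc : ¬ ((m : Int) ≤ 0) := by exact_mod_cast Nat.not_le.mpr hm
  rw [hieu_luan_phien_alt, if_neg hc]
  have htl : (PySem.Int.toStr (m : Int)).toList = Nat.toDigits 10 m := by
    rw [PySem.Int.toList_toStr, PySem.Int.toChars]
    have : ¬ ((m : Int) < 0) := by omega
    rw [if_neg this, Int.toNat_natCast]
  rw [htl, Nat.toDigits, toDigitsCore_eq (m + 1) m [] hm (by omega), List.append_nil,
    List.foldl_reverse, List.foldr_map]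
  have hlt : ∀ d ∈ Nat.digits 10 m, d < 10 := fun d hd => Nat.digits_lt_base (by norm_num) hd
  rw [foldr_digitChar _ hlt, foldr_pvG]

-- ===== VERDICT (by name: the statement is the Claim_ definition above) =====
theorem hieu_luan_phien_spec : Claim_equal_hieu_luan_phien := by
  intro n _
  unfold Spec_hieu_luan_phien
  by_cases hn : 0 < n
  · have hm : 0 < n.toNat := by omega
    have hcast : ((n.toNat : Nat) : Int) = n := Int.toNat_of_nonneg (by omega)
    rw [← hcast, alt_eq_foldr n.toNat hm, hieu_luan_phien, pvRevLoop]
    have h0 : (0 : Int) = ((0 : Nat) : Int) := rfl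
    rw [h0, Int.toNat_natCast,
      pvRevLoopAux_natCast n.toNat n.toNat 0 (le_refl _), pvSumLoop, Int.toNat_natCast,
      pvSumLoopAux_natCast (pvRevNat n.toNat 0) (pvRevNat n.toNat 0) (le_refl _),
      pvAlt_digits_rev]
    ring
  · have hz : n.toNat = 0 := by omega
    rw [hieu_luan_phien, pvRevLoop, hz, pvRevLoopAux, hieu_luan_phien_alt,
      if_pos (by omega : n ≤ 0)]
    rfl
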